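-- pv_equiv track=rewrite | github.com/Mitduyigi/Directed-Research-in-AI-System-I-24Fall-course-project-code | project_code/experiment/evalaute.py | preprocess_models
-- ===== SOURCE A (Python) =====
-- def preprocess_models(file_names, parameters):
--     learning_rate_models = {"0.001": [], "0.0005": [], "0.0001": [], "5e-05": []}
--     hidden_dim_models = {"128": [], "64": [], "32": []}
--     improvements_models = {"[]": [], "['DoubleDQN']": [], "['PrioritizedDQN']": [], "['DuelingDQN']": [],
--                            "['DoubleDQN', 'PrioritizedDQN', 'DuelingDQN']": [],
--                            "['DoubleDQN', 'PrioritizedDQN']": [],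
--                            "['DoubleDQN', 'DuelingDQN']": [],
--                            "['PrioritizedDQN', 'DuelingDQN']": []}
--
--     for file_name, param in zip(file_names, parameters):
--         learning_rate = param.get("learning_rate", None)
--         hidden_dim = param.get("hidden_dim", None)
--         improvements = param.get("improvements", None)
--         if learning_rate in learning_rate_models:
--             learning_rate_models[learning_rate].append(file_name)
--         if hidden_dim in hidden_dim_models:
--             hidden_dim_models[hidden_dim].append(file_name)
--         if improvements in improvements_models:
--             improvements_models[improvements].append(file_name)
--     return learning_rate_models, hidden_dim_models, improvements_models
-- ===== SOURCE B (Python) =====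
-- def preprocess_models(file_names, parameters):
--     pairs = list(zip(file_names, parameters))
--
--     def bucket(field, keys):
--         return {k: [f for f, p in pairs if p.get(field) == k] for k in keys}
--
--     return (
--         bucket("learning_rate", ["0.001", "0.0005", "0.0001", "5e-05"]),
--         bucket("hidden_dim", ["128", "64", "32"]),
--         bucket("improvements", ["[]", "['DoubleDQN']", "['PrioritizedDQN']",
--                                 "['DuelingDQN']",
--                                 "['DoubleDQN', 'PrioritizedDQN', 'DuelingDQN']",
--                                 "['DoubleDQN', 'PrioritizedDQN']",
--                                 "['DoubleDQN', 'DuelingDQN']",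
--                                 "['PrioritizedDQN', 'DuelingDQN']"]),
--     )
-- ===== Notes on version B (the rewrite author's own statement) =====
-- stated objective: simpler
-- what changed: Replaces the single stateful loop that mutates three dicts with a per-key dict comprehension: each result dict is built by filtering the zipped (file, params) pairs for each fixed key.
import Mathlib
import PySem

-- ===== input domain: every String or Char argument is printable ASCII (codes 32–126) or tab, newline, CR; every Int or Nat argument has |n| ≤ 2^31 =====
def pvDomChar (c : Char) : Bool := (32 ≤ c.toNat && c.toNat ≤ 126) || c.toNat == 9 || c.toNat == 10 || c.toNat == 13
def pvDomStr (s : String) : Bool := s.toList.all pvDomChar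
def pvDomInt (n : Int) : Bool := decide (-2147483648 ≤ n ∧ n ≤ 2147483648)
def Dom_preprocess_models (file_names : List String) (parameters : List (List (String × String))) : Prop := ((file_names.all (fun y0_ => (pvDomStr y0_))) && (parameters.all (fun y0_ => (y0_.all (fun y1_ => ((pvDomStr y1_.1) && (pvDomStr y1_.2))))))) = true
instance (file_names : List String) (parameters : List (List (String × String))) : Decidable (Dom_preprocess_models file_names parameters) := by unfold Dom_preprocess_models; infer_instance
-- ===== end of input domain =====

-- B replaces A's single stateful loop mutating three dicts with per-key filters over the zipped pairs (simpler decomposition).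


-- ===== PORT A =====
-- param.get(key, None) on a Python dict = first-match lookup in the association list
def pvLookup (p : List (String × String)) (key : String) : Option String :=
  match p with
  | [] => none
  | (k, v) :: rest => if k == key then some v else pvLookup rest key

-- 'if x in d: d[x].append(f)' on a fixed-key dict, as an association-list update
def pvBucketAdd (d : List (String × List String)) (key : Option String) (f : String) :
    List (String × List String) :=
  match key with
  | none => d
  | some k =>
      if d.any (fun e => e.1 == k) then
        d.map (fun e => if e.1 == k then (e.1, e.2 ++ [f]) else e)
      else d

def preprocess_models (file_names : List String) (parameters : List (List (String × String))) : (List (String × List String)) × (List (String × List String)) × (List (String × List String)) :=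
  let lr0 : List (String × List String) :=
    [("0.001", []), ("0.0005", []), ("0.0001", []), ("5e-05", [])]
  let hd0 : List (String × List String) := [("128", []), ("64", []), ("32", [])]
  let im0 : List (String × List String) :=
    [("[]", []), ("['DoubleDQN']", []), ("['PrioritizedDQN']", []), ("['DuelingDQN']", []),
     ("['DoubleDQN', 'PrioritizedDQN', 'DuelingDQN']", []),
     ("['DoubleDQN', 'PrioritizedDQN']", []),
     ("['DoubleDQN', 'DuelingDQN']", []),
     ("['PrioritizedDQN', 'DuelingDQN']", [])]
  let r := (file_names.zip parameters).foldl
    (fun (st : (List (String × List String)) × (List (String × List String)) × (List (String × List String))) fp =>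
      let learning_rate := pvLookup fp.2 "learning_rate"
      let hidden_dim := pvLookup fp.2 "hidden_dim"
      let improvements := pvLookup fp.2 "improvements"
      (pvBucketAdd st.1 learning_rate fp.1,
       pvBucketAdd st.2.1 hidden_dim fp.1,
       pvBucketAdd st.2.2 improvements fp.1))
    (lr0, hd0, im0)
  r

-- ===== PORT B =====
-- {k: [f for f, p in pairs if p.get(field) == k] for k in keys}
def pvBucketB (pairs : List (String × List (String × String))) (field : String)
    (keys : List String) : List (String × List String) :=
  keys.map (fun k =>
    (k, (pairs.filter (fun fp => pvLookup fp.2 field == some k)).map (fun fp => fp.1)))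

def preprocess_models_alt (file_names : List String) (parameters : List (List (String × String))) : (List (String × List String)) × (List (String × List String)) × (List (String × List String)) :=
  let pairs := file_names.zip parameters
  (pvBucketB pairs "learning_rate" ["0.001", "0.0005", "0.0001", "5e-05"],
   pvBucketB pairs "hidden_dim" ["128", "64", "32"],
   pvBucketB pairs "improvements"
     ["[]", "['DoubleDQN']", "['PrioritizedDQN']", "['DuelingDQN']",
      "['DoubleDQN', 'PrioritizedDQN', 'DuelingDQN']",
      "['DoubleDQN', 'PrioritizedDQN']",
      "['DoubleDQN', 'DuelingDQN']",
      "['PrioritizedDQN', 'DuelingDQN']"])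

-- ===== PRECONDITION & SPEC =====
def Spec_preprocess_models (file_names : List String) (parameters : List (List (String × String))) (out : (List (String × List String)) × (List (String × List String)) × (List (String × List String))) : Prop := out = preprocess_models_alt file_names parameters
instance (file_names : List String) (parameters : List (List (String × String))) (out : (List (String × List String)) × (List (String × List String)) × (List (String × List String))) : Decidable (Spec_preprocess_models file_names parameters out) := by unfold Spec_preprocess_models; infer_instance

-- ===== CLAIM (what is proved, stated in full; the proofs are below) =====
def Claim_equal_preprocess_models : Prop := ∀ (file_names : List String) (parameters : List (List (String × String))), Dom_preprocess_models file_names parameters → Spec_preprocess_models file_names parameters (preprocess_models file_names parameters)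

-- ===== LEMMAS AND PROOFS =====

-- Folding pvBucketAdd over the pairs appends, in each bucket, exactly the
-- filenames whose looked-up parameter equals that bucket's key.
theorem foldl_bucketAdd (field : String)
    (pairs : List (String × List (String × String)))
    (d : List (String × List String)) :
    pairs.foldl (fun d fp => pvBucketAdd d (pvLookup fp.2 field) fp.1) d
      = d.map (fun e =>
          (e.1, e.2 ++ (pairs.filter (fun fp => pvLookup fp.2 field == some e.1)).map (fun fp => fp.1))) := by
  induction pairs generalizing d with
  | nil => simp
  | cons fp rest ih =>
      simp only [List.foldl_cons, List.filter_cons, ih]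
      cases hk : pvLookup fp.2 field with
      | none =>
          simp [pvBucketAdd]
      | some k =>
          simp only [pvBucketAdd]
          by_cases hmem : d.any (fun e => e.1 == k)
          · simp only [hmem, if_true, List.map_map]
            apply List.map_congr_left
            intro e _
            by_cases he : e.1 = k
            · simp [Function.comp, he]
            · have : (k == e.1) = false := by
                rw [beq_eq_false_iff_ne]; exact fun h => he h.symm
              simp [Function.comp, he, this]
          · simp only [hmem]
            apply List.map_congr_left
            intro e hed
            have hne : e.1 ≠ k := by
              intro h
              exact hmem (List.any_eq_true.mpr ⟨e, hed, by simp [h]⟩)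
            have : (k == e.1) = false := by
              rw [beq_eq_false_iff_ne]; exact fun h => hne h.symm
            simp [this]

-- A triple-state fold whose step acts componentwise is the triple of folds.
theorem foldl_prod3 {α β γ δ : Type}
    (l : List δ) (f : δ → α → α) (g : δ → β → β) (h : δ → γ → γ)
    (a : α) (b : β) (c : γ) :
    l.foldl (fun (st : α × β × γ) x => (f x st.1, g x st.2.1, h x st.2.2)) (a, b, c)
      = (l.foldl (fun a x => f x a) a, l.foldl (fun b x => g x b) b,
         l.foldl (fun c x => h x c) c) := by
  induction l generalizing a b c with
  | nil => rfl
  | cons x rest ih => simpa using ih (f x a) (g x b) (h x c)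

-- ===== VERDICT (by name: the statement is the Claim_ definition above) =====
theorem preprocess_models_spec : Claim_equal_preprocess_models := by
  intro file_names parameters _
  show _ = _
  simp only [preprocess_models, preprocess_models_alt]
  rw [foldl_prod3 (file_names.zip parameters)
        (fun fp a => pvBucketAdd a (pvLookup fp.2 "learning_rate") fp.1)
        (fun fp b => pvBucketAdd b (pvLookup fp.2 "hidden_dim") fp.1)
        (fun fp c => pvBucketAdd c (pvLookup fp.2 "improvements") fp.1)]
  rw [foldl_bucketAdd, foldl_bucketAdd, foldl_bucketAdd]
  simp [pvBucketB]
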